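-- pv_equiv track=rewrite | github.com/NoMoreFear/Cryptography | Elliptic_Knapsack.py | Sym_to_bin
-- ===== SOURCE A (Python) =====
-- def Sym_to_bin(sym, length):
--     symbol = list(bin(ord(sym)))
--     symbol = [int(symbol[i]) for i in range(2, len(symbol))]
--     while True:
--         if len(symbol) < length:
--             symbol.insert(0, 0)
--         else:
--             return symbol
-- ===== SOURCE B (Python) =====
-- def Sym_to_bin(sym, length):
--     n = ord(sym)
--     width = max(n.bit_length(), 1, length)
--     return [(n >> i) & 1 for i in reversed(range(width))]
-- ===== Notes on version B (the rewrite author's own statement) =====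
-- stated objective: idiomatic
-- what changed: B computes the output width as max(bit_length, 1, length) and emits the bits directly by shifting ((n >> i) & 1) from most to least significant, instead of parsing the bin() string and front-inserting zeros in a while loop.
import Mathlib
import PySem

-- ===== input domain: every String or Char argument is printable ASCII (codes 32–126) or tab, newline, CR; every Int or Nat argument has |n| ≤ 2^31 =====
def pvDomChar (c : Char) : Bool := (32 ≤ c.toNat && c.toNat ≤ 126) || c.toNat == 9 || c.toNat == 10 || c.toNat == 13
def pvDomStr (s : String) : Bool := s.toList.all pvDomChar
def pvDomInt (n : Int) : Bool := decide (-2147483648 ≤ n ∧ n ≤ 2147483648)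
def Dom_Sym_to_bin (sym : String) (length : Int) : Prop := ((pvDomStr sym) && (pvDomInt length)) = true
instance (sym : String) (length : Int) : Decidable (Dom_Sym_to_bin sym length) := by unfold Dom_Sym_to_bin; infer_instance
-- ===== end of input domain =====

-- B replaces A's bin()-string parsing and front-insert padding loop by direct bit
-- extraction over a width computed up front (idiomatic; return values proved equal).

-- ===== PORT A =====
-- digits of bin(n) after the "0b" prefix, MSB first (exact for n ≥ 0)
def pvBinDigits (n : Nat) : List Int :=
  if n < 2 then [(n : Int)]
  else pvBinDigits (n / 2) ++ [((n % 2 : Nat) : Int)]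
decreasing_by omega

-- the `while True: if len(symbol) < length: symbol.insert(0, 0) else: return symbol` loop
def pvPadLoop (symbol : List Int) (length : Int) : List Int :=
  if (symbol.length : Int) < length then pvPadLoop (0 :: symbol) length else symbol
termination_by (length - symbol.length).toNat
decreasing_by simp only [List.length_cons]; omega

def Sym_to_bin (sym : String) (length : Int) : List Int :=
  match sym.toList with
  | [c] => pvPadLoop (pvBinDigits c.toNat) length   -- ord(sym) requires a 1-char string
  | _ => []

-- ===== PORT B =====
def Sym_to_bin_alt (sym : String) (length : Int) : List Int :=
  if sym.toList.length = 1 then   -- ord(sym) requires a 1-char string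
    let n := (sym.toList.headD ' ').toNat
    let width : Int := max (max (n.size : Int) 1) length   -- bit_length() = Nat.size
    (List.range width.toNat).reverse.map (fun i => (((n >>> i) &&& 1 : Nat) : Int))
  else []

-- ===== PRECONDITION & SPEC =====
-- Pre_ excludes strings whose length is not 1: there Python's ord() raises TypeError.
def Pre_Sym_to_bin (sym : String) (length : Int) : Prop := sym.toList.length = 1
instance (sym : String) (length : Int) : Decidable (Pre_Sym_to_bin sym length) := by
  unfold Pre_Sym_to_bin; infer_instance

def pvWitness_Sym_to_bin : String × Int := ("A", 10)

def Spec_Sym_to_bin (sym : String) (length : Int) (out : List Int) : Prop := out = Sym_to_bin_alt sym length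
instance (sym : String) (length : Int) (out : List Int) : Decidable (Spec_Sym_to_bin sym length out) := by unfold Spec_Sym_to_bin; infer_instance

-- ===== CLAIM (what is proved, stated in full; the proofs are below) =====
def Claim_equal_Sym_to_bin : Prop := ∀ (sym : String) (length : Int), Dom_Sym_to_bin sym length → Pre_Sym_to_bin sym length → Spec_Sym_to_bin sym length (Sym_to_bin sym length)

-- ===== LEMMAS AND PROOFS =====

-- the bit list B builds, as a function of the width
def pvBits (n w : Nat) : List Int :=
  (List.range w).reverse.map (fun i => (((n >>> i) &&& 1 : Nat) : Int))

theorem pvBits_length (n w : Nat) : (pvBits n w).length = w := by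
  simp [pvBits]

theorem pvBits_succ_div (n w : Nat) :
    pvBits n (w + 1) = pvBits (n / 2) w ++ [((n % 2 : Nat) : Int)] := by
  simp only [pvBits, List.range_succ_eq_map, List.reverse_cons, List.map_append,
    List.map_reverse, List.map_map, List.map_cons, List.map_nil]
  congr 2
  · exact List.map_congr_left (fun i _ => by
      simp [Function.comp, Nat.shiftRight_succ_inside])
  · simp [Nat.and_one_is_mod]

theorem pvBits_succ_zero (n w : Nat) (h : n < 2 ^ w) :
    pvBits n (w + 1) = 0 :: pvBits n w := by
  have h0 : n >>> w = 0 := by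
    rw [Nat.shiftRight_eq_div_pow]; exact Nat.div_eq_of_lt h
  simp only [pvBits, List.range_succ, List.reverse_append, List.reverse_cons,
    List.reverse_nil, List.nil_append, List.singleton_append, List.map_cons, h0,
    Nat.zero_and, Nat.cast_zero]

theorem pvBinDigits_eq_bits (n : Nat) :
    pvBinDigits n = pvBits n (max n.size 1) := by
  induction n using Nat.strong_induction_on with
  | _ n ih =>
    rw [pvBinDigits]
    by_cases h : n < 2
    · interval_cases n <;> simp [pvBits]
    · simp only [if_neg h]
      have h2 : 2 ≤ n := by omega
      have hd : n / 2 < n := by omega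
      have hpos : 1 ≤ n / 2 := by omega
      have hsz : 1 ≤ (n / 2).size := Nat.size_pos.mpr hpos
      have hbit : n.size = (n / 2).size + 1 := by
        have hb := Nat.size_bit (b := decide (n % 2 = 1)) (n := n >>> 1)
          (by rw [Nat.bit_decide_mod_two_eq_one_shiftRight_one]; omega)
        rw [Nat.bit_decide_mod_two_eq_one_shiftRight_one, Nat.shiftRight_one] at hb
        exact hb
      have hmax : max n.size 1 = (max (n / 2).size 1) + 1 := by omega
      rw [ih (n / 2) hd, hmax, pvBits_succ_div]

theorem pvPad_bits (n : Nat) (length : Int) :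
    ∀ d w, length.toNat - w = d → n < 2 ^ w →
      pvPadLoop (pvBits n w) length = pvBits n (max w length.toNat) := by
  intro d
  induction d with
  | zero =>
    intro w hd hn
    rw [pvPadLoop]
    have hw : ¬ (((pvBits n w).length : Int) < length) := by
      rw [pvBits_length]; omega
    rw [if_neg hw]
    congr 1
    omega
  | succ d ih =>
    intro w hd hn
    rw [pvPadLoop]
    have hw : (((pvBits n w).length : Int) < length) := by
      rw [pvBits_length]; omega
    rw [if_pos hw, ← pvBits_succ_zero n w hn]
    have := ih (w + 1) (by omega) (by
      calc n < 2 ^ w := hn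
        _ ≤ 2 ^ (w + 1) := Nat.pow_le_pow_right (by omega) (by omega))
    rw [this]
    congr 1
    omega

-- ===== VERDICT (by name: the statement is the Claim_ definition above) =====
theorem Sym_to_bin_spec : Claim_equal_Sym_to_bin := by
  intro sym length _dom pre
  unfold Spec_Sym_to_bin
  unfold Pre_Sym_to_bin at pre
  obtain ⟨c, hc⟩ : ∃ c, sym.toList = [c] := by
    cases h : sym.toList with
    | nil => simp [h] at pre
    | cons a t =>
      cases t with
      | nil => exact ⟨a, rfl⟩
      | cons b u => simp [h] at pre
  rw [Sym_to_bin, Sym_to_bin_alt, hc]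
  simp only [List.length_cons, List.length_nil, List.headD_cons, if_pos]
  set n := c.toNat with hn
  have hlt : n < 2 ^ (max n.size 1) :=
    Nat.size_le.mp (le_max_left _ _)
  have hb := pvBinDigits_eq_bits n
  rw [hb, pvPad_bits n length (length.toNat - max n.size 1) (max n.size 1) rfl hlt]
  show pvBits n _ = _
  congr 1
  omega
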